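-- pv_equiv track=rewrite | github.com/DhimanGhosh/raspi_homelab_python_framework | plugins/personal-library/docker/app.py | derive_scores
-- ===== SOURCE A (Python) =====
-- def derive_scores(genre, description, title, categories, india_set, language=""):
--     text = f"{genre} {description} {title} {' '.join(categories)} {language}".lower()
--     wow, emotional, sadness, realism = 3, 3, 2, 3
--     if any(w in text for w in ["thriller","mystery","murder","crime","killer","suspense","feluda","byomkesh"]): wow = 5
--     elif any(w in text for w in ["epic","mythology","science fiction","dystopia"]):                             wow = 4
--     if any(w in text for w in ["love","family","friendship","loss","grief","heart"]):     emotional = 5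
--     elif any(w in text for w in ["journey","identity","coming of age"]):                  emotional = 4
--     if any(w in text for w in ["tragic","death","war","partition","betrayal","grief","loss"]): sadness = 5
--     elif any(w in text for w in ["melancholy","lonely","broken"]):                         sadness = 4
--     elif any(w in text for w in ["romance","emotional"]):                                  sadness = 3
--     if any(w in text for w in ["literary","family life","historical","contemporary","campus","realistic","bengali"]): realism = 5
--     elif any(w in text for w in ["mythology","science fiction","fantasy"]):                realism = 2
--     elif any(w in text for w in ["thriller","mystery"]):                                   realism = 4
--     if india_set == "Yes":
--         realism = min(5, realism + 1)
--     return wow, emotional, sadness, realism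
-- ===== SOURCE B (Python) =====
-- # B: different algorithm — instead of per-field first-match if/elif chains, one
-- # global scan collects every matching (field, priority, score) rule, and each
-- # field's score is the MAXIMUM-priority match (default when none matched).
--
-- TIERS = {
--     "wow": (3, [
--         (5, ["thriller", "mystery", "murder", "crime", "killer", "suspense", "feluda", "byomkesh"]),
--         (4, ["epic", "mythology", "science fiction", "dystopia"]),
--     ]),
--     "emotional": (3, [
--         (5, ["love", "family", "friendship", "loss", "grief", "heart"]),
--         (4, ["journey", "identity", "coming of age"]),
--     ]),
--     "sadness": (2, [
--         (5, ["tragic", "death", "war", "partition", "betrayal", "grief", "loss"]),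
--         (4, ["melancholy", "lonely", "broken"]),
--         (3, ["romance", "emotional"]),
--     ]),
--     "realism": (3, [
--         (5, ["literary", "family life", "historical", "contemporary", "campus", "realistic", "bengali"]),
--         (2, ["mythology", "science fiction", "fantasy"]),
--         (4, ["thriller", "mystery"]),
--     ]),
-- }
--
-- # flat rule relation: (field, priority, score, keyword); earlier tiers get a
-- # HIGHER priority, so "first matching tier" == "maximum-priority matching rule"
-- RULES = [(f, len(tiers) - i, s, w)
--          for f, (_d, tiers) in TIERS.items()
--          for i, (s, ws) in enumerate(tiers)
--          for w in ws]
--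
--
-- def derive_scores(genre, description, title, categories, india_set, language=""):
--     text = f"{genre} {description} {title} {' '.join(categories)} {language}".lower()
--     matches = [r for r in RULES if r[3] in text]
--
--     def best(field, default):
--         return max(((p, s) for (g, p, s, _w) in matches if g == field),
--                    key=lambda ps: ps[0], default=(0, default))[1]
--
--     wow = best("wow", 3)
--     emotional = best("emotional", 3)
--     sadness = best("sadness", 2)
--     realism = best("realism", 3)
--     if india_set == "Yes":
--         realism = min(5, realism + 1)
--     return wow, emotional, sadness, realism
-- ===== Notes on version B (the rewrite author's own statement) =====
-- stated objective: alternative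
-- what changed: Replaces the four per-field first-match if/elif keyword chains by one global scan that collects all matching rules from a flat (field, priority, score, keyword) relation and selects each field's score as the maximum-priority match, with the default when nothing matched.
import Mathlib
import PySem

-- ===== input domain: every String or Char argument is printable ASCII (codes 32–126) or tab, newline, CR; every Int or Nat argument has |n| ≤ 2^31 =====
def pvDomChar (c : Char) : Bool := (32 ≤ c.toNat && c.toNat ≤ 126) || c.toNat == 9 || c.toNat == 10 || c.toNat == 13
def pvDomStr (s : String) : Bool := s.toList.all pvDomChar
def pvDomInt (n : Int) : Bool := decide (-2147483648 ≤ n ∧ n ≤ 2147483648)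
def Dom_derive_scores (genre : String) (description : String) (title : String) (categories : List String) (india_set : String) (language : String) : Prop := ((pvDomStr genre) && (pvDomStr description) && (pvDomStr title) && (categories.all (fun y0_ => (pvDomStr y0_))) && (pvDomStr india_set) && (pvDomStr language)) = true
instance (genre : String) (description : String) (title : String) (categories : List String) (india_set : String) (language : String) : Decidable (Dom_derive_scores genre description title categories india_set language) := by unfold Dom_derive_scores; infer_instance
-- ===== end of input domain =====

-- B replaces A's four per-field first-match if/elif keyword chains by one global scan that
-- collects all matching rules of a flat (field, priority, score, keyword) relation and picks
-- each field's score as the maximum-priority match (objective: alternative algorithm).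

-- ===== PORT A =====
def derive_scores (genre : String) (description : String) (title : String) (categories : List String) (india_set : String) (language : String) : Int × Int × Int × Int :=
  let text : String := PySem.Str.lower (genre ++ " " ++ description ++ " " ++ title ++ " " ++ PySem.Str.join " " categories ++ " " ++ language)
  let wow : Int := 3
  let emotional : Int := 3
  let sadness : Int := 2
  let realism : Int := 3
  let wow :=
    if (["thriller","mystery","murder","crime","killer","suspense","feluda","byomkesh"].any (fun w => PySem.Str.isIn w text)) then (5 : Int)
    else if (["epic","mythology","science fiction","dystopia"].any (fun w => PySem.Str.isIn w text)) then 4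
    else wow
  let emotional :=
    if (["love","family","friendship","loss","grief","heart"].any (fun w => PySem.Str.isIn w text)) then (5 : Int)
    else if (["journey","identity","coming of age"].any (fun w => PySem.Str.isIn w text)) then 4
    else emotional
  let sadness :=
    if (["tragic","death","war","partition","betrayal","grief","loss"].any (fun w => PySem.Str.isIn w text)) then (5 : Int)
    else if (["melancholy","lonely","broken"].any (fun w => PySem.Str.isIn w text)) then 4
    else if (["romance","emotional"].any (fun w => PySem.Str.isIn w text)) then 3
    else sadness
  let realism :=
    if (["literary","family life","historical","contemporary","campus","realistic","bengali"].any (fun w => PySem.Str.isIn w text)) then (5 : Int)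
    else if (["mythology","science fiction","fantasy"].any (fun w => PySem.Str.isIn w text)) then 2
    else if (["thriller","mystery"].any (fun w => PySem.Str.isIn w text)) then 4
    else realism
  let realism := if india_set == "Yes" then min 5 (realism + 1) else realism
  (wow, emotional, sadness, realism)

-- ===== PORT B =====
-- TIERS table of Source B: per field the default and the ordered (score, keywords) tiers
def bTiers : List (String × Int × List (Int × List String)) :=
  [("wow", 3, [(5, ["thriller","mystery","murder","crime","killer","suspense","feluda","byomkesh"]),
               (4, ["epic","mythology","science fiction","dystopia"])]),
   ("emotional", 3, [(5, ["love","family","friendship","loss","grief","heart"]),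
                     (4, ["journey","identity","coming of age"])]),
   ("sadness", 2, [(5, ["tragic","death","war","partition","betrayal","grief","loss"]),
                   (4, ["melancholy","lonely","broken"]),
                   (3, ["romance","emotional"])]),
   ("realism", 3, [(5, ["literary","family life","historical","contemporary","campus","realistic","bengali"]),
                   (2, ["mythology","science fiction","fantasy"]),
                   (4, ["thriller","mystery"])])]

-- flat rule relation RULES of Source B: (field, priority = len(tiers)-i, score, keyword)
def bRules : List (String × Int × Int × String) :=
  bTiers.flatMap (fun ft =>
    (PySem.List.enumerate ft.2.2).flatMap (fun it =>
      it.2.2.map (fun w => (ft.1, (ft.2.2.length : Int) - it.1, it.2.1, w))))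

def derive_scores_alt (genre : String) (description : String) (title : String) (categories : List String) (india_set : String) (language : String) : Int × Int × Int × Int :=
  let text : String := PySem.Str.lower (genre ++ " " ++ description ++ " " ++ title ++ " " ++ PySem.Str.join " " categories ++ " " ++ language)
  let mtchs := bRules.filter (fun r => PySem.Str.isIn r.2.2.2 text)
  let best := fun (field : String) (default : Int) =>
    (PySem.List.maxD ((mtchs.filter (fun r => r.1 == field)).map (fun r => (r.2.1, r.2.2.1)))
      (fun ps => ps.1) (0, default)).2
  let wow := best "wow" 3
  let emotional := best "emotional" 3
  let sadness := best "sadness" 2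
  let realism := best "realism" 3
  let realism := if india_set == "Yes" then min 5 (realism + 1) else realism
  (wow, emotional, sadness, realism)

-- ===== PRECONDITION & SPEC =====
def Spec_derive_scores (genre : String) (description : String) (title : String) (categories : List String) (india_set : String) (language : String) (out : Int × Int × Int × Int) : Prop := out = derive_scores_alt genre description title categories india_set language
instance (genre : String) (description : String) (title : String) (categories : List String) (india_set : String) (language : String) (out : Int × Int × Int × Int) : Decidable (Spec_derive_scores genre description title categories india_set language out) := by unfold Spec_derive_scores; infer_instance

-- ===== CLAIM (what is proved, stated in full; the proofs are below) =====
def Claim_equal_derive_scores : Prop := ∀ (genre : String) (description : String) (title : String) (categories : List String) (india_set : String) (language : String), Dom_derive_scores genre description title categories india_set language → Spec_derive_scores genre description title categories india_set language (derive_scores genre description title categories india_set language)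

-- ===== LEMMAS AND PROOFS =====

-- the step of Python max(..., key=lambda ps: ps[0]) as a named function (defeq to PySem.List.max?'s foldl step)
def pvStep (acc : Option (Int × Int)) (x : Int × Int) : Option (Int × Int) :=
  match acc with
  | none => some x
  | some m => if m.1 < x.1 then some x else some m

lemma pvStep_idem (acc : Option (Int × Int)) (c : Int × Int) :
    pvStep (pvStep acc c) c = pvStep acc c := by
  cases acc with
  | none => simp [pvStep]
  | some m =>
      by_cases h : m.1 < c.1 <;> simp [pvStep, h]

lemma foldl_pvStep_const (l : List String) (p : String → Bool) (c : Int × Int) (acc : Option (Int × Int)) :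
    ((l.filter p).map (fun _ => c)).foldl pvStep acc = if l.any p then pvStep acc c else acc := by
  induction l generalizing acc with
  | nil => simp
  | cons w t ih =>
      by_cases h : p w
      · simp [h, ih, pvStep_idem, -List.map_const, -List.map_const']
      · simp [h, ih, -List.map_const, -List.map_const']

lemma filter_swap {α : Type} (l : List α) (p q : α → Bool) :
    (l.filter p).filter q = (l.filter q).filter p := by
  rw [List.filter_filter, List.filter_filter]
  exact List.filter_congr (fun a _ => by simp [Bool.and_comm])

-- a single constant-tier segment of the B pipeline, folded away
lemma seg_fold (ws : List String) (f : String) (pr s : Int) (p : String → Bool) (acc : Option (Int × Int)) :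
    ((((ws.map (fun w => (f, pr, s, w))).filter (fun r => p r.2.2.2)).map
        (fun r : String × Int × Int × String => (r.2.1, r.2.2.1))).foldl pvStep acc)
      = if ws.any p then pvStep acc (pr, s) else acc := by
  simp only [List.filter_map, List.map_map, Function.comp_def]
  exact foldl_pvStep_const ws p (pr, s) acc

-- Python's max(xs, key=lambda ps: ps[0], default=(0,d)) as a foldl of pvStep
lemma maxD_pvStep (xs : List (Int × Int)) (d : Int) :
    PySem.List.maxD xs (fun ps => ps.1) (0, d) = (xs.foldl pvStep none).getD (0, d) := by
  unfold PySem.List.maxD PySem.List.max?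
  congr 2
  funext acc x
  cases acc <;> simp [pvStep]

-- a field with two tiers (priorities 2,1): B's max-priority selection = A's if/elif chain
lemma field2 (t1 t2 : List String) (s1 s2 d : Int) (f : String) (p : String → Bool)
    (h : bRules.filter (fun r => r.1 == f)
          = t1.map (fun w => (f, (2 : Int), s1, w)) ++ t2.map (fun w => (f, (1 : Int), s2, w))) :
    (PySem.List.maxD (((bRules.filter (fun r => p r.2.2.2)).filter (fun r => r.1 == f)).map
        (fun r : String × Int × Int × String => (r.2.1, r.2.2.1))) (fun ps => ps.1) (0, d)).2
      = if t1.any p then s1 else if t2.any p then s2 else d := by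
  rw [filter_swap, h, List.filter_append, List.map_append]
  rw [maxD_pvStep, List.foldl_append, seg_fold, seg_fold]
  by_cases h1 : t1.any p <;> by_cases h2 : t2.any p <;>
    simp [h1, h2, pvStep]

-- a field with three tiers (priorities 3,2,1)
lemma field3 (t1 t2 t3 : List String) (s1 s2 s3 d : Int) (f : String) (p : String → Bool)
    (h : bRules.filter (fun r => r.1 == f)
          = t1.map (fun w => (f, (3 : Int), s1, w)) ++ t2.map (fun w => (f, (2 : Int), s2, w))
              ++ t3.map (fun w => (f, (1 : Int), s3, w))) :
    (PySem.List.maxD (((bRules.filter (fun r => p r.2.2.2)).filter (fun r => r.1 == f)).map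
        (fun r : String × Int × Int × String => (r.2.1, r.2.2.1))) (fun ps => ps.1) (0, d)).2
      = if t1.any p then s1 else if t2.any p then s2 else if t3.any p then s3 else d := by
  rw [filter_swap, h, List.filter_append, List.filter_append, List.map_append, List.map_append]
  rw [maxD_pvStep, List.foldl_append, List.foldl_append, seg_fold, seg_fold, seg_fold]
  by_cases h1 : t1.any p <;> by_cases h2 : t2.any p <;> by_cases h3 : t3.any p <;>
    simp [h1, h2, h3, pvStep]


-- the field lemmas with the concrete substring predicate, in rewrite-friendly (first-order) form
lemma field2' (t1 t2 : List String) (s1 s2 d : Int) (f : String) (text : String)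
    (h : bRules.filter (fun r => r.1 == f)
          = t1.map (fun w => (f, (2 : Int), s1, w)) ++ t2.map (fun w => (f, (1 : Int), s2, w))) :
    (PySem.List.maxD (((bRules.filter (fun r => PySem.Str.isIn r.2.2.2 text)).filter (fun r => r.1 == f)).map
        (fun r : String × Int × Int × String => (r.2.1, r.2.2.1))) (fun ps => ps.1) (0, d)).2
      = if t1.any (fun w => PySem.Str.isIn w text) then s1
        else if t2.any (fun w => PySem.Str.isIn w text) then s2 else d :=
  field2 t1 t2 s1 s2 d f (fun w => PySem.Str.isIn w text) h

lemma field3' (t1 t2 t3 : List String) (s1 s2 s3 d : Int) (f : String) (text : String)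
    (h : bRules.filter (fun r => r.1 == f)
          = t1.map (fun w => (f, (3 : Int), s1, w)) ++ t2.map (fun w => (f, (2 : Int), s2, w))
              ++ t3.map (fun w => (f, (1 : Int), s3, w))) :
    (PySem.List.maxD (((bRules.filter (fun r => PySem.Str.isIn r.2.2.2 text)).filter (fun r => r.1 == f)).map
        (fun r : String × Int × Int × String => (r.2.1, r.2.2.1))) (fun ps => ps.1) (0, d)).2
      = if t1.any (fun w => PySem.Str.isIn w text) then s1
        else if t2.any (fun w => PySem.Str.isIn w text) then s2
        else if t3.any (fun w => PySem.Str.isIn w text) then s3 else d :=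
  field3 t1 t2 t3 s1 s2 s3 d f (fun w => PySem.Str.isIn w text) h

-- ===== VERDICT (by name: the statement is the Claim_ definition above) =====
theorem derive_scores_spec : Claim_equal_derive_scores := by
  intro genre description title categories india_set language _
  show derive_scores genre description title categories india_set language
      = derive_scores_alt genre description title categories india_set language
  simp only [derive_scores, derive_scores_alt]
  have hw : bRules.filter (fun r => r.1 == "wow")
      = (["thriller","mystery","murder","crime","killer","suspense","feluda","byomkesh"].map (fun w => ("wow", (2 : Int), (5 : Int), w)))
          ++ (["epic","mythology","science fiction","dystopia"].map (fun w => ("wow", (1 : Int), (4 : Int), w))) := by rfl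
  have he : bRules.filter (fun r => r.1 == "emotional")
      = (["love","family","friendship","loss","grief","heart"].map (fun w => ("emotional", (2 : Int), (5 : Int), w)))
          ++ (["journey","identity","coming of age"].map (fun w => ("emotional", (1 : Int), (4 : Int), w))) := by rfl
  have hs : bRules.filter (fun r => r.1 == "sadness")
      = (["tragic","death","war","partition","betrayal","grief","loss"].map (fun w => ("sadness", (3 : Int), (5 : Int), w)))
          ++ (["melancholy","lonely","broken"].map (fun w => ("sadness", (2 : Int), (4 : Int), w)))
          ++ (["romance","emotional"].map (fun w => ("sadness", (1 : Int), (3 : Int), w))) := by rfl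
  have hr : bRules.filter (fun r => r.1 == "realism")
      = (["literary","family life","historical","contemporary","campus","realistic","bengali"].map (fun w => ("realism", (3 : Int), (5 : Int), w)))
          ++ (["mythology","science fiction","fantasy"].map (fun w => ("realism", (2 : Int), (2 : Int), w)))
          ++ (["thriller","mystery"].map (fun w => ("realism", (1 : Int), (4 : Int), w))) := by rfl
  rw [field2' (h := hw), field2' (h := he), field3' (h := hs), field3' (h := hr)]
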